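-- pv_equiv track=rewrite | github.com/zekerdoodle/SecondBrain | interface/server/mcp_tools/utilities/compact_conversation.py | _split_at_exchange_boundary
-- ===== SOURCE A (Python) =====
-- from typing import Any, Dict, List, Tuple
--
-- def _split_at_exchange_boundary(
--     messages: List[Dict], keep_last_n: int = 5
-- ) -> Tuple[List[Dict], List[Dict]]:
--     """
--     Split messages into (older, recent) preserving last N exchanges verbatim.
--
--     An exchange = a user message + its associated assistant reply + any
--     interleaved tool_call/system messages between them.
--
--     Walks backwards counting user messages. The split point is placed just
--     before the Nth user message from the end, so all associated tool_call
--     and assistant messages for those exchanges stay in the recent portion.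
--     """
--     user_count = 0
--     split_index = 0  # Default: everything is "recent"
--
--     for i in range(len(messages) - 1, -1, -1):
--         if messages[i].get("role") == "user":
--             user_count += 1
--             if user_count >= keep_last_n:
--                 split_index = i
--                 break
--
--     return messages[:split_index], messages[split_index:]
-- ===== SOURCE B (Python) =====
-- from typing import Dict, List, Tuple
--
--
-- def _split_at_exchange_boundary(
--     messages: List[Dict], keep_last_n: int = 5
-- ) -> Tuple[List[Dict], List[Dict]]:
--     """Split messages into (older, recent) keeping the last N exchanges.
--
--     Forward scan once to tabulate the positions of all user messages, then
--     pick the boundary by indexing that table from the end.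
--     """
--     user_indices = [i for i, m in enumerate(messages) if m.get("role") == "user"]
--     n = max(keep_last_n, 1)
--     split_index = user_indices[-n] if len(user_indices) >= n else 0
--     return messages[:split_index], messages[split_index:]
-- ===== Notes on version B (the rewrite author's own statement) =====
-- stated objective: simpler
-- what changed: Replaces the backward counter loop with early break by a single forward scan that tabulates all user-message indices and then selects the boundary by indexing that table from the end with n = max(keep_last_n, 1).
import Mathlib
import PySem

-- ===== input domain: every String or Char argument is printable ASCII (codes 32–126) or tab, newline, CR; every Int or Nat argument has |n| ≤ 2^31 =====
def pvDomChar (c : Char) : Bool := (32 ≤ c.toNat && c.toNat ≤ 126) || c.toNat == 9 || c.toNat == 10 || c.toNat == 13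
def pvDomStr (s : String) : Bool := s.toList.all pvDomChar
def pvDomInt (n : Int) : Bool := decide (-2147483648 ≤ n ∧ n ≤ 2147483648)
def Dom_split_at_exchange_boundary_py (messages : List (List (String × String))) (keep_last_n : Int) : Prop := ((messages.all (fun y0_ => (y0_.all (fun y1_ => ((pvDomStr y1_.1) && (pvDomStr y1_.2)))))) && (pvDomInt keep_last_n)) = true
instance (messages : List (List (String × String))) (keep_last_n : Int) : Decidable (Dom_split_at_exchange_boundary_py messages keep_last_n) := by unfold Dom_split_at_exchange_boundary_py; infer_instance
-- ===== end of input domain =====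

-- B replaces A's backward counter loop (with early break) by one forward scan that
-- tabulates the user-message indices and indexes that table from the end: simpler.

-- m.get("role") == "user"  (shared accessor for both ports)
def pvIsUser (m : List (String × String)) : Bool :=
  PySem.Dict.get? (PySem.Dict.mk m) "role" == some "user"

-- ===== PORT A =====
-- A's backward for-loop over range(len(messages)-1, -1, -1) with counter and break;
-- the loop index is always in range, so messages[i] is ported as pyGetD (default unused).
def pvALoop (messages : List (List (String × String))) (keep_last_n : Int) :
    List Int → Int → Int
  | [], _ => 0                                    -- loop ends without break: split_index keeps its default 0
  | i :: rest, user_count =>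
    if pvIsUser (PySem.List.pyGetD messages i []) then
      if user_count + 1 ≥ keep_last_n then i      -- break with split_index = i
      else pvALoop messages keep_last_n rest (user_count + 1)
    else pvALoop messages keep_last_n rest user_count

def split_at_exchange_boundary_py (messages : List (List (String × String))) (keep_last_n : Int) : (List (List (String × String))) × (List (List (String × String))) :=
  let split_index := pvALoop messages keep_last_n
    (PySem.List.pyRange (PySem.List.len messages - 1) (-1) (-1)) 0
  (PySem.List.slice messages none (some split_index),
   PySem.List.slice messages (some split_index) none)

-- ===== PORT B =====
def split_at_exchange_boundary_py_alt (messages : List (List (String × String))) (keep_last_n : Int) : (List (List (String × String))) × (List (List (String × String))) :=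
  let user_indices := ((PySem.List.enumerate messages).filter (fun p => pvIsUser p.2)).map (·.1)
  let n := max keep_last_n 1
  -- user_indices[-n] is guarded by len(user_indices) >= n, so it never raises: pyGetD (default unused)
  let split_index := if PySem.List.len user_indices ≥ n then PySem.List.pyGetD user_indices (-n) 0 else 0
  (PySem.List.slice messages none (some split_index),
   PySem.List.slice messages (some split_index) none)

-- ===== PRECONDITION & SPEC =====
def Spec_split_at_exchange_boundary_py (messages : List (List (String × String))) (keep_last_n : Int) (out : (List (List (String × String))) × (List (List (String × String)))) : Prop := out = split_at_exchange_boundary_py_alt messages keep_last_n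
instance (messages : List (List (String × String))) (keep_last_n : Int) (out : (List (List (String × String))) × (List (List (String × String)))) : Decidable (Spec_split_at_exchange_boundary_py messages keep_last_n out) := by unfold Spec_split_at_exchange_boundary_py; infer_instance

-- ===== CLAIM (what is proved, stated in full; the proofs are below) =====
def Claim_equal_split_at_exchange_boundary_py : Prop := ∀ (messages : List (List (String × String))) (keep_last_n : Int), Dom_split_at_exchange_boundary_py messages keep_last_n → Spec_split_at_exchange_boundary_py messages keep_last_n (split_at_exchange_boundary_py messages keep_last_n)

-- ===== LEMMAS AND PROOFS =====

-- abstract "pick the need-th listed index, else 0" selector that A's loop computes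
def pvG : List Int → Int → Int
  | [], _ => 0
  | j :: rest, need => if need ≤ 1 then j else pvG rest (need - 1)

-- canonical ascending table of user-message positions (Nat side)
def pvUidx (messages : List (List (String × String))) : List Nat :=
  (List.range messages.length).filter (fun k => pvIsUser (messages.getD k []))

theorem pvALoop_eq_g (messages : List (List (String × String))) (keep_last_n : Int) :
    ∀ (idxs : List Int) (cnt : Int),
      pvALoop messages keep_last_n idxs cnt
        = pvG (idxs.filter (fun i => pvIsUser (PySem.List.pyGetD messages i []))) (keep_last_n - cnt) := by
  intro idxs
  induction idxs with
  | nil => intro cnt; simp [pvALoop, pvG]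
  | cons i rest ih =>
    intro cnt
    cases hb : pvIsUser (PySem.List.pyGetD messages i []) with
    | true =>
      simp only [pvALoop, hb, if_true, List.filter_cons, pvG]
      split_ifs with h1 h2 h2
      · rfl
      · omega
      · omega
      · rw [ih (cnt + 1)]; ring_nf
    | false =>
      simp only [pvALoop, hb, Bool.false_eq_true, if_false, List.filter_cons]
      exact ih cnt

theorem pvG_eq_getD : ∀ (fl : List Int) (need : Int),
    pvG fl need
      = if (max need 1).toNat ≤ fl.length then fl.getD ((max need 1).toNat - 1) 0 else 0 := by
  intro fl
  induction fl with
  | nil =>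
    intro need
    rw [pvG, if_neg]
    simp only [List.length_nil]
    omega
  | cons j rest ih =>
    intro need
    by_cases h : need ≤ 1
    · simp [pvG, h]
    · have h2 : (max (need - 1) 1).toNat = (max need 1).toNat - 1 := by omega
      have h3 : 1 ≤ (max need 1).toNat - 1 := by omega
      rw [pvG, if_neg h, ih (need - 1), h2]
      by_cases hl : (max need 1).toNat ≤ rest.length + 1
      · rw [if_pos (by omega), if_pos (by simpa using hl)]
        have : (max need 1).toNat - 1 = ((max need 1).toNat - 1 - 1) + 1 := by omega
        rw [this]
        simp [List.getD]
      · rw [if_neg (by omega), if_neg (by simpa using hl)]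

-- B's forward enumerate-filter table equals the canonical table, shifted by the start
theorem pvEnum_filter (q : List (String × String) → Bool) :
    ∀ (messages : List (List (String × String))) (s : Int),
      ((PySem.List.enumerate messages s).filter (fun p => q p.2)).map (·.1)
        = ((List.range messages.length).filter (fun k => q (messages.getD k []))).map
            (fun (k : Nat) => ((k : Int) + s)) := by
  intro messages
  induction messages with
  | nil => intro s; simp [PySem.List.enumerate_nil]
  | cons m ms ih =>
    intro s
    rw [PySem.List.enumerate_cons, List.filter_cons, List.length_cons,
      List.range_succ_eq_map, List.filter_cons]
    have htail :
        ((List.filter ((fun k => q ((m :: ms).getD k [])) ∘ Nat.succ) (List.range ms.length)).map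
            Nat.succ).map (fun (k : Nat) => ((k : Int) + s))
          = (List.filter (fun k => q (ms.getD k [])) (List.range ms.length)).map
              (fun (k : Nat) => ((k : Int) + (s + 1))) := by
      rw [List.filter_congr (fun k _ => by simp [Function.comp] :
        ∀ k ∈ List.range ms.length,
          ((fun k => q ((m :: ms).getD k [])) ∘ Nat.succ) k = (fun k => q (ms.getD k [])) k)]
      rw [List.map_map]
      exact List.map_congr_left (fun k _ => by simp [Function.comp]; ring)
    by_cases h : q m = true
    · have h0 : q ((m :: ms).getD 0 []) = true := h
      rw [if_pos h, if_pos h0, List.map_cons, List.map_cons, ih (s + 1),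
        List.filter_map, htail]
      simp
    · have h0 : ¬ q ((m :: ms).getD 0 []) = true := h
      rw [if_neg h, if_neg h0, ih (s + 1), List.filter_map, htail]

-- A's reversed index list, filtered, is the canonical table reversed (cast to Int)
theorem pvA_filter (messages : List (List (String × String))) :
    (PySem.List.pyRange (PySem.List.len messages - 1) (-1) (-1)).filter
        (fun i => pvIsUser (PySem.List.pyGetD messages i []))
      = ((pvUidx messages).map (fun (k : Nat) => ((k : Int)))).reverse := by
  rw [PySem.List.len_eq, PySem.List.pyRange_neg_one_eq_reverse,
    (by ring : (-1 : Int) + 1 = 0),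
    (by ring : (messages.length : Int) - 1 + 1 = (messages.length : Int)),
    PySem.List.pyRange_zero_natCast, List.filter_reverse, List.filter_map]
  congr 1
  rw [pvUidx]
  congr 1
  apply List.filter_congr
  intro k _
  simp [Function.comp, PySem.List.pyGetD_natCast]

-- the two boundary computations agree
theorem pvSplit_eq (messages : List (List (String × String))) (keep_last_n : Int) :
    pvALoop messages keep_last_n
        (PySem.List.pyRange (PySem.List.len messages - 1) (-1) (-1)) 0
      = (if PySem.List.len (((PySem.List.enumerate messages).filter
              (fun p => pvIsUser p.2)).map (·.1)) ≥ max keep_last_n 1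
          then PySem.List.pyGetD (((PySem.List.enumerate messages).filter
              (fun p => pvIsUser p.2)).map (·.1)) (-(max keep_last_n 1)) 0
          else 0) := by
  rw [pvALoop_eq_g, pvA_filter, pvEnum_filter pvIsUser messages 0]
  rw [List.map_congr_left (fun k _ => by ring :
    ∀ k ∈ List.filter (fun k => pvIsUser (messages.getD k [])) (List.range messages.length),
      ((k : Int) + 0) = ((k : Int)))]
  rw [(by rfl : (List.range messages.length).filter
        (fun k => pvIsUser (messages.getD k [])) = pvUidx messages)]
  rw [pvG_eq_getD, PySem.List.len_eq, sub_zero]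
  have hM : 1 ≤ max keep_last_n 1 := le_max_right _ _
  have hMt : ((max keep_last_n 1).toNat : Int) = max keep_last_n 1 := Int.toNat_of_nonneg (by omega)
  set n' : Nat := (max keep_last_n 1).toNat with hn'
  set U : List Int := (pvUidx messages).map (fun (k : Nat) => ((k : Int))) with hU
  have hlen : U.length = (pvUidx messages).length := by simp [hU]
  by_cases hle : n' ≤ U.length
  · rw [if_pos (by simpa [List.length_reverse] using hle), if_pos (by push_cast [hlen]; omega)]
    have h1 : n' - 1 < U.reverse.length := by simp [List.length_reverse]; omega
    have h2 : U.length - n' < U.length := by omega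
    rw [List.getD_eq_getElem _ _ h1, List.getElem_reverse]
    have hidx : U.length - 1 - (n' - 1) = U.length - n' := by omega
    rw [PySem.List.pyGetD, PySem.List.pyGet?, PySem.List.pyIdx?]
    rw [if_neg (by omega : ¬ (0 : Int) ≤ -(max keep_last_n 1)),
      if_pos (by omega : -(U.length : Int) ≤ -(max keep_last_n 1))]
    have hnt : (-(-(max keep_last_n 1))).toNat = n' := by omega
    rw [hnt]
    simp [List.getElem?_eq_getElem h2, hidx]
  · rw [if_neg (by simpa [List.length_reverse] using hle), if_neg (by push_cast [hlen]; omega)]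

theorem pvMain (messages : List (List (String × String))) (keep_last_n : Int) :
    split_at_exchange_boundary_py messages keep_last_n
      = split_at_exchange_boundary_py_alt messages keep_last_n := by
  rw [split_at_exchange_boundary_py, split_at_exchange_boundary_py_alt]
  rw [pvSplit_eq]

-- ===== VERDICT (by name: the statement is the Claim_ definition above) =====
theorem split_at_exchange_boundary_py_spec : Claim_equal_split_at_exchange_boundary_py := by
  intro messages keep_last_n _
  unfold Spec_split_at_exchange_boundary_py
  exact pvMain messages keep_last_n
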